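-- pv_equiv track=rewrite | github.com/ckiep/financetracker | .idea/formula.py | find_discontinuity_point
-- ===== SOURCE A (Python) =====
-- def find_discontinuity_point(estimates):
--     max_difference = 0
--     discontinuity_point = None
--     for i in range(1, len(estimates)):
--         difference = abs(estimates[i] - estimates[i - 1])
--         if difference > max_difference:
--             max_difference = difference
--             discontinuity_point = i
--     return discontinuity_point
-- ===== SOURCE B (Python) =====
-- def find_discontinuity_point(estimates):
--     diffs = [abs(b - a) for a, b in zip(estimates, estimates[1:])]
--     m = max(diffs, default=0)
--     if m == 0:
--         return None
--     return diffs.index(m) + 1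
-- ===== Notes on version B (the rewrite author's own statement) =====
-- stated objective: alternative
-- what changed: Replaces A's fused running-max scan with state (max_difference, discontinuity_point) by a two-phase pipeline: build the table of absolute consecutive differences, then select max() and locate its first occurrence with list.index.
import Mathlib
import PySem

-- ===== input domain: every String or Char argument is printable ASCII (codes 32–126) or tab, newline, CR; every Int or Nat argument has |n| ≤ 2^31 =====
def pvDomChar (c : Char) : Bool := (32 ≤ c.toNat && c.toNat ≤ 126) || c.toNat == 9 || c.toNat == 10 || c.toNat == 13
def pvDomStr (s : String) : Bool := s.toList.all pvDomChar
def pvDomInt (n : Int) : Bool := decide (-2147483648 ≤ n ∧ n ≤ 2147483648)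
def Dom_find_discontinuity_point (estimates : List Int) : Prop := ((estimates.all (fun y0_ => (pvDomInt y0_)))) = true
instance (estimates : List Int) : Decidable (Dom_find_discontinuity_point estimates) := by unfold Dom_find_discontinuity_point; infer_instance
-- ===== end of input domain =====

-- B replaces A's fused running-max scan by a two-phase pipeline: build the list of
-- absolute consecutive differences, then select its maximum and first index (same cost).


-- ===== PORT A =====
-- the for-loop over range(1, len(estimates)): at step i the pair (estimates[i-1], estimates[i])
-- is the current two-head of the walked list, so the loop is this structural recursion
def pvLoopA (maxd : Int) (dp : Option Int) (i : Int) : List Int → Option Int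
  | a :: b :: rest =>
      let difference := |b - a|
      if difference > maxd then pvLoopA difference (some i) (i + 1) (b :: rest)
      else pvLoopA maxd dp (i + 1) (b :: rest)
  | _ => dp

def find_discontinuity_point (estimates : List Int) : Option Int :=
  pvLoopA 0 none 1 estimates

-- ===== PORT B =====
def find_discontinuity_point_alt (estimates : List Int) : Option Int :=
  let diffs := (estimates.zip (PySem.List.slice estimates (some 1) none)).map (fun p => |p.2 - p.1|)
  let m := (PySem.List.max? diffs (fun y => y)).getD 0   -- max(diffs, default=0)
  if m = 0 then none
  else (PySem.List.index? diffs m).map (fun j => (j : Int) + 1)  -- diffs.index(m) + 1; m ∈ diffs here, so index never fails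

-- ===== PRECONDITION & SPEC =====
def Spec_find_discontinuity_point (estimates : List Int) (out : Option Int) : Prop := out = find_discontinuity_point_alt estimates
instance (estimates : List Int) (out : Option Int) : Decidable (Spec_find_discontinuity_point estimates out) := by unfold Spec_find_discontinuity_point; infer_instance

-- ===== CLAIM (what is proved, stated in full; the proofs are below) =====
def Claim_equal_find_discontinuity_point : Prop := ∀ (estimates : List Int), Dom_find_discontinuity_point estimates → Spec_find_discontinuity_point estimates (find_discontinuity_point estimates)

-- ===== LEMMAS AND PROOFS =====

-- the list of absolute consecutive differences, in A's traversal shape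
def pvDiffs : List Int → List Int
  | a :: b :: rest => |b - a| :: pvDiffs (b :: rest)
  | _ => []

lemma pvDiffs_eq_zip : ∀ xs : List Int,
    pvDiffs xs = (xs.zip xs.tail).map (fun p => |p.2 - p.1|)
  | [] => rfl
  | [_] => rfl
  | a :: b :: r => by
      simp [pvDiffs, pvDiffs_eq_zip (b :: r)]

lemma pvDiffs_nonneg (xs : List Int) : ∀ x ∈ pvDiffs xs, 0 ≤ x := by
  intro x hx
  rw [pvDiffs_eq_zip] at hx
  obtain ⟨p, -, rfl⟩ := List.mem_map.mp hx
  exact abs_nonneg _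

lemma pvLoopA_eq : ∀ (xs : List Int) (i maxd : Int) (dp : Option Int), 0 ≤ maxd →
    pvLoopA maxd dp i xs =
      (if (pvDiffs xs).foldl max maxd = maxd then dp
       else (PySem.List.index? (pvDiffs xs) ((pvDiffs xs).foldl max maxd)).map
              (fun j => i + (j : Int)))
  | [] => by intro i maxd dp _; simp [pvLoopA, pvDiffs]
  | [_] => by intro i maxd dp _; simp [pvLoopA, pvDiffs]
  | a :: b :: r => by
      intro i maxd dp hmaxd
      have habs : (0:Int) ≤ |b - a| := abs_nonneg _
      show pvLoopA maxd dp i (a :: b :: r) = _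
      rw [pvDiffs]
      by_cases h : |b - a| > maxd
      · have hstep : pvLoopA maxd dp i (a :: b :: r)
            = pvLoopA (|b - a|) (some i) (i + 1) (b :: r) := by
          simp [pvLoopA, h]
        rw [hstep, pvLoopA_eq (b :: r) (i + 1) (|b - a|) (some i) habs]
        have hfold : (|b - a| :: pvDiffs (b :: r)).foldl max maxd
            = (pvDiffs (b :: r)).foldl max (|b - a|) := by
          simp [List.foldl_cons, max_eq_right h.le]
        set M := (pvDiffs (b :: r)).foldl max (|b - a|) with hM
        have hMge : |b - a| ≤ M := (PySem.List.le_foldl_max _ _).1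
        rw [hfold]
        have hMne : ¬ M = maxd := by omega
        rw [if_neg hMne]
        by_cases hMd : M = |b - a|
        · rw [if_pos hMd, hMd, PySem.List.index?_cons_self]
          simp
        · rw [if_neg hMd, PySem.List.index?_cons_of_ne _ (fun hh => hMd hh.symm)]
          cases PySem.List.index? (pvDiffs (b :: r)) M with
          | none => simp
          | some j => simp; ring
      · have hstep : pvLoopA maxd dp i (a :: b :: r)
            = pvLoopA maxd dp (i + 1) (b :: r) := by
          simp [pvLoopA, h]
        rw [hstep, pvLoopA_eq (b :: r) (i + 1) maxd dp hmaxd]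
        have hfold : (|b - a| :: pvDiffs (b :: r)).foldl max maxd
            = (pvDiffs (b :: r)).foldl max maxd := by
          simp [List.foldl_cons, max_eq_left (not_lt.mp h)]
        set M := (pvDiffs (b :: r)).foldl max maxd with hM
        have hMge : maxd ≤ M := (PySem.List.le_foldl_max _ _).1
        rw [hfold]
        by_cases hMm : M = maxd
        · simp [hMm]
        · rw [if_neg hMm, if_neg hMm]
          have hMd : |b - a| ≠ M := by
            have : |b - a| ≤ maxd := not_lt.mp h
            omega
          rw [PySem.List.index?_cons_of_ne _ hMd]
          cases PySem.List.index? (pvDiffs (b :: r)) M with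
          | none => simp
          | some j => simp; ring

-- B's max(diffs, default=0) equals the running max from 0, since all diffs are ≥ 0
lemma pvMaxD_eq (xs : List Int) :
    ((PySem.List.max? (pvDiffs xs) (fun y => y)).getD 0) = (pvDiffs xs).foldl max 0 := by
  cases hds : pvDiffs xs with
  | nil => simp [PySem.List.max?]
  | cons x t =>
      have hx : (0:Int) ≤ x := pvDiffs_nonneg xs x (by rw [hds]; simp)
      rw [PySem.List.max?_id_cons]
      simp [List.foldl_cons, max_eq_right hx]

-- ===== VERDICT (by name: the statement is the Claim_ definition above) =====
theorem find_discontinuity_point_spec : Claim_equal_find_discontinuity_point := by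
  intro estimates _
  show find_discontinuity_point estimates = find_discontinuity_point_alt estimates
  simp only [find_discontinuity_point, find_discontinuity_point_alt]
  rw [PySem.List.slice_from_one, ← pvDiffs_eq_zip, pvLoopA_eq estimates 1 0 none le_rfl,
    pvMaxD_eq]
  by_cases h : (pvDiffs estimates).foldl max 0 = 0
  · simp [h]
  · rw [if_neg h, if_neg h]
    cases PySem.List.index? (pvDiffs estimates) ((pvDiffs estimates).foldl max 0) with
    | none => simp
    | some j => simp [Int.add_comm]
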